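-- pv_equiv track=rewrite | github.com/kisanasaki/Atcoder | opt/contest/ABC417/ABC417C.py | count
-- ===== SOURCE A (Python) =====
-- from collections import Counter
--
-- def count(N, A):
--     counter = Counter()
--     ans = 0
--     for j in range(N):
--         key = j - A[j]
--         ans += counter[key]
--         counter[j + A[j]] += 1
--     return ans
-- ===== SOURCE B (Python) =====
-- import bisect
--
-- def count(N, A):
--     # Pass 1: group indices by the value i + A[i] (each bucket is increasing).
--     table = {}
--     for i in range(N):
--         table.setdefault(i + A[i], []).append(i)
--     # Pass 2: for each j, count stored indices with i + A[i] == j - A[j] and i < j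
--     # by binary search for j in the (sorted) bucket.
--     ans = 0
--     for j in range(N):
--         ans += bisect.bisect_left(table.get(j - A[j], []), j)
--     return ans
-- ===== Notes on version B (the rewrite author's own statement) =====
-- stated objective: alternative
-- what changed: Replaces the single pass with a running Counter of i+A[i] by two separate passes: one builds a dict from each key to the sorted list of indices attaining it, then a query pass uses bisect_left to count indices strictly below j, so no mutable counter is threaded through the counting loop.
import Mathlib
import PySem

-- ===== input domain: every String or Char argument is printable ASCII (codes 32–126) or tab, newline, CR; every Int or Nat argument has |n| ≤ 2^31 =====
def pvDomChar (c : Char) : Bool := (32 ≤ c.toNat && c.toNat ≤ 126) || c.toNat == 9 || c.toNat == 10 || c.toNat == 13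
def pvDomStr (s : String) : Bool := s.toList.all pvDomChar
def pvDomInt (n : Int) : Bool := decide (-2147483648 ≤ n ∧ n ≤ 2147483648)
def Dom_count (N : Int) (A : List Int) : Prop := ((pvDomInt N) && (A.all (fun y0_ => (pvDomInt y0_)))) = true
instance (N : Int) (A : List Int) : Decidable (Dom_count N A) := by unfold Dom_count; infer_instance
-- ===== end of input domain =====

-- B replaces A's single pass with a running Counter by two passes: a dict from each key
-- i+A[i] to its (increasing) list of indices, then a query pass that counts indices
-- strictly below j with bisect_left (alternative decomposition, similar cost).

-- ===== PORT A =====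
-- one iteration of A's loop: ans += counter[j - A[j]], then counter[j + A[j]] += 1
def stepA (A : List Int) (st : PySem.Dict Int Int × Int) (j : Int) : PySem.Dict Int Int × Int :=
  let key := j - PySem.List.pyGetD A j 0
  let ans := st.2 + st.1.getD key 0
  (st.1.modify (j + PySem.List.pyGetD A j 0) 0 (· + 1), ans)

def count (N : Int) (A : List Int) : Int :=
  ((PySem.List.pyRange 0 N).foldl (stepA A) (PySem.Dict.empty, 0)).2

-- ===== PORT B =====
-- pass 1 of B: table.setdefault(i + A[i], []).append(i)
def buildTable (A : List Int) (R : List Int) : PySem.Dict Int (List Int) :=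
  R.foldl (fun d i => d.modify (i + PySem.List.pyGetD A i 0) [] (· ++ [i])) PySem.Dict.empty

def count_alt (N : Int) (A : List Int) : Int :=
  let table := buildTable A (PySem.List.pyRange 0 N)
  (PySem.List.pyRange 0 N).foldl
    (fun ans j =>
      ans + (PySem.List.bisectLeft (table.getD (j - PySem.List.pyGetD A j 0) []) j : Int)) 0

-- ===== PRECONDITION & SPEC =====
-- Pre_: A indexes A[j] for every j in range(N), so it raises IndexError when N > len(A).
def Pre_count (N : Int) (A : List Int) : Prop := N ≤ (A.length : Int)
instance (N : Int) (A : List Int) : Decidable (Pre_count N A) := by unfold Pre_count; infer_instance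

def pvWitness_count : Int × List Int := (2, [0, 1])

def Spec_count (N : Int) (A : List Int) (out : Int) : Prop := out = count_alt N A
instance (N : Int) (A : List Int) (out : Int) : Decidable (Spec_count N A out) := by unfold Spec_count; infer_instance

-- ===== CLAIM (what is proved, stated in full; the proofs are below) =====
def Claim_equal_count : Prop := ∀ (N : Int) (A : List Int), Dom_count N A → Pre_count N A → Spec_count N A (count N A)

-- ===== LEMMAS AND PROOFS =====

-- common closed form both loops are reduced to:
-- sum over j in range(n) of |{ i in range(j) : i + A[i] = j - A[j] }|
def pairSum (A : List Int) (n : Nat) : Int :=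
  ((PySem.List.pyRange 0 (n : Int)).map fun j =>
    (((PySem.List.pyRange 0 j).countP
        (fun i => (i + PySem.List.pyGetD A i 0) == (j - PySem.List.pyGetD A j 0))) : Int)).sum

lemma pyRange_split (a m b : Int) (h1 : a ≤ m) (h2 : m ≤ b) :
    PySem.List.pyRange a b = PySem.List.pyRange a m ++ PySem.List.pyRange m b := by
  have aux : ∀ k : Nat, PySem.List.pyRange a (m + k) = PySem.List.pyRange a m ++ PySem.List.pyRange m (m + k) := by
    intro k
    induction k with
    | zero => simp [PySem.List.pyRange_one]
    | succ k ih =>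
        have hk : (m : Int) ≤ m + k := by omega
        have hak : (a : Int) ≤ m + k := by omega
        have hcast : (m : Int) + (k + 1 : Nat) = (m + k) + 1 := by push_cast; ring
        rw [hcast, PySem.List.pyRange_one_succ_right hak, PySem.List.pyRange_one_succ_right hk, ih,
          List.append_assoc]
  have hb : b = m + ((b - m).toNat : Int) := by omega
  rw [hb] at *
  exact aux _

-- bisect_left on a (≤-)sorted list returns the number of elements strictly below x
lemma bisect_countP (xs : List Int) (x : Int) (h : xs.Pairwise (· ≤ ·)) :
    PySem.List.bisectLeft xs x = xs.countP (fun y => decide (y < x)) := by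
  obtain ⟨hb, hlt, hge⟩ := PySem.List.bisectLeft_spec xs x h
  set b := PySem.List.bisectLeft xs x with hbdef
  conv_rhs => rw [← List.take_append_drop b xs]
  rw [List.countP_append]
  have h1 : (xs.take b).countP (fun y => decide (y < x)) = (xs.take b).length := by
    rw [List.countP_eq_length]
    intro a ha
    rw [List.mem_take_iff_getElem] at ha
    obtain ⟨j, hm, rfl⟩ := ha
    have hj : j < xs.length := lt_of_lt_of_le hm (min_le_right _ _)
    have hjb : j < b := lt_of_lt_of_le hm (min_le_left _ _)
    exact decide_eq_true (hlt j hj hjb)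
  have h2 : (xs.drop b).countP (fun y => decide (y < x)) = 0 := by
    rw [List.countP_eq_zero]
    intro a ha
    rw [List.mem_iff_getElem] at ha
    obtain ⟨j, hj, rfl⟩ := ha
    rw [List.getElem_drop]
    have hlen : b + j < xs.length := by
      simp [List.length_drop] at hj; omega
    have := hge (b + j) hlen (Nat.le_add_right _ _)
    simp
    omega
  rw [h1, h2, List.length_take]
  omega

-- A's counter after processing R holds, at v, the number of j ∈ R with f j = v
lemma cnt_getD (f : Int → Int) (R : List Int) (v : Int) :
    (R.foldl (fun (d : PySem.Dict Int Int) j => d.modify (f j) 0 (· + 1)) PySem.Dict.empty).getD v 0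
      = (R.countP (fun j => f j == v) : Int) := by
  have h : R.foldl (fun (d : PySem.Dict Int Int) j => d.modify (f j) 0 (· + 1)) PySem.Dict.empty
      = (R.map f).foldl (fun d x => d.modify x 0 (· + 1)) PySem.Dict.empty := by
    rw [List.foldl_map]
  rw [h, PySem.Dict.getD_foldl_modify_add_one]
  simp [List.count, List.countP_map, Function.comp_def]

-- B's table maps c to the (order-preserving) list of i ∈ R with f i = c
lemma table_getD (f : Int → Int) (R : List Int) (c : Int) :
    (R.foldl (fun (d : PySem.Dict Int (List Int)) i => d.modify (f i) [] (· ++ [i])) PySem.Dict.empty).getD c []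
      = R.filter (fun i => f i == c) := by
  have h : R.foldl (fun (d : PySem.Dict Int (List Int)) i => d.modify (f i) [] (· ++ [i])) PySem.Dict.empty
      = (R.map (fun i => (f i, i))).foldl (fun d p => d.modify p.1 [] (· ++ [p.2])) PySem.Dict.empty := by
    rw [List.foldl_map]
  rw [h, PySem.Dict.getD_foldl_modify_append, List.filter_map]
  simp [List.map_map, Function.comp_def]

lemma pairSum_succ (A : List Int) (n : Nat) :
    pairSum A (n + 1) = pairSum A n
      + (((PySem.List.pyRange 0 (n : Int)).countP
          (fun i => (i + PySem.List.pyGetD A i 0) == ((n : Int) - PySem.List.pyGetD A (n : Int) 0))) : Int) := by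
  unfold pairSum
  rw [show ((n + 1 : Nat) : Int) = (n : Int) + 1 by push_cast; ring,
    PySem.List.pyRange_one_succ_right (by positivity), List.map_append, List.sum_append]
  simp

lemma A_pair (A : List Int) (n : Nat) :
    (PySem.List.pyRange 0 (n : Int)).foldl (stepA A) (PySem.Dict.empty, 0)
      = ((PySem.List.pyRange 0 (n : Int)).foldl
          (fun d j => d.modify (j + PySem.List.pyGetD A j 0) 0 (· + 1)) PySem.Dict.empty,
         pairSum A n) := by
  induction n with
  | zero => simp [PySem.List.pyRange_one, pairSum]
  | succ n ih =>
      rw [show ((n + 1 : Nat) : Int) = (n : Int) + 1 by push_cast; ring,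
        PySem.List.pyRange_one_succ_right (by positivity), List.foldl_append, List.foldl_append, ih]
      rw [pairSum_succ]
      simp only [stepA, List.foldl_cons, List.foldl_nil]
      rw [cnt_getD (fun j => j + PySem.List.pyGetD A j 0)]

lemma A_eval (A : List Int) (n : Nat) : count (n : Int) A = pairSum A n := by
  unfold count
  rw [A_pair]

lemma B_eval (A : List Int) (n : Nat) : count_alt (n : Int) A = pairSum A n := by
  show ((PySem.List.pyRange 0 (n : Int)).foldl
    (fun ans j =>
      ans + (PySem.List.bisectLeft
        ((buildTable A (PySem.List.pyRange 0 (n : Int))).getD (j - PySem.List.pyGetD A j 0) []) j : Int)) 0)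
    = pairSum A n
  rw [PySem.List.foldl_add, zero_add]
  unfold pairSum
  refine congrArg List.sum (List.map_congr_left ?_)
  intro j hj
  rw [PySem.List.mem_pyRange_one] at hj
  unfold buildTable
  rw [table_getD (fun i => i + PySem.List.pyGetD A i 0)]
  have hsorted : ((PySem.List.pyRange 0 (n : Int)).filter
      (fun i => (i + PySem.List.pyGetD A i 0) == (j - PySem.List.pyGetD A j 0))).Pairwise (· ≤ ·) :=
    List.Pairwise.sublist List.filter_sublist ((PySem.List.pairwise_lt_pyRange_one 0 (n : Int)).imp le_of_lt)
  rw [bisect_countP _ _ hsorted, List.countP_filter]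
  rw [pyRange_split 0 j (n : Int) hj.1 (le_of_lt hj.2), List.countP_append]
  have hz : (PySem.List.pyRange j (n : Int)).countP
      (fun a => decide (a < j) && ((a + PySem.List.pyGetD A a 0) == (j - PySem.List.pyGetD A j 0))) = 0 := by
    rw [List.countP_eq_zero]
    intro a ha
    rw [PySem.List.mem_pyRange_one] at ha
    simp only [Bool.and_eq_true, decide_eq_true_eq, beq_iff_eq, not_and]
    intro hlt; omega
  have hc : (PySem.List.pyRange 0 j).countP
      (fun a => decide (a < j) && ((a + PySem.List.pyGetD A a 0) == (j - PySem.List.pyGetD A j 0)))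
      = (PySem.List.pyRange 0 j).countP
      (fun i => (i + PySem.List.pyGetD A i 0) == (j - PySem.List.pyGetD A j 0)) := by
    refine List.countP_congr ?_
    intro x hx
    rw [PySem.List.mem_pyRange_one] at hx
    simp [hx.2]
  rw [hz, hc, Nat.add_zero]

-- a range with any upper bound is the range to its toNat (empty when N ≤ 0)
lemma range_toNat (N : Int) : PySem.List.pyRange 0 N = PySem.List.pyRange 0 (N.toNat : Int) := by
  rw [PySem.List.pyRange_one, PySem.List.pyRange_one]
  have h : (N - 0).toNat = ((N.toNat : Int) - 0).toNat := by omega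
  rw [h]

-- ===== VERDICT (by name: the statement is the Claim_ definition above) =====
theorem count_spec : Claim_equal_count := by
  intro N A _ _
  show count N A = count_alt N A
  have hc : count N A = count (N.toNat : Int) A := by
    unfold count; rw [range_toNat]
  have hb : count_alt N A = count_alt (N.toNat : Int) A := by
    unfold count_alt buildTable; rw [range_toNat]
  rw [hc, hb, A_eval, B_eval]
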